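-- pv_equiv track=rewrite | github.com/lovepoem/flamescope | app/cpuprofile/flame_graph.py | get_meta_ids
-- ===== SOURCE A (Python) =====
-- def get_meta_ids(nodes):
--     program_node_id = None
--     idle_node_id = None
--     gc_node_id = None
--     for key, node in nodes.items():
--         if node['function_name'] == '(program)':
--             program_node_id = key
--         elif node['function_name'] == '(idle)':
--             idle_node_id = key
--         elif node['function_name'] == '(garbage collector)':
--             gc_node_id = key
--     return program_node_id, idle_node_id, gc_node_id
-- ===== SOURCE B (Python) =====
-- def get_meta_ids(nodes):
--     index = {node['function_name']: key for key, node in nodes.items()}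
--     return (index.get('(program)'), index.get('(idle)'),
--             index.get('(garbage collector)'))
-- ===== Notes on version B (the rewrite author's own statement) =====
-- stated objective: idiomatic
-- what changed: Replaces the three-variable if/elif capture loop by building a function_name->key index dict in one comprehension (last occurrence wins, like the loop) and returning three .get lookups.
import Mathlib
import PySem

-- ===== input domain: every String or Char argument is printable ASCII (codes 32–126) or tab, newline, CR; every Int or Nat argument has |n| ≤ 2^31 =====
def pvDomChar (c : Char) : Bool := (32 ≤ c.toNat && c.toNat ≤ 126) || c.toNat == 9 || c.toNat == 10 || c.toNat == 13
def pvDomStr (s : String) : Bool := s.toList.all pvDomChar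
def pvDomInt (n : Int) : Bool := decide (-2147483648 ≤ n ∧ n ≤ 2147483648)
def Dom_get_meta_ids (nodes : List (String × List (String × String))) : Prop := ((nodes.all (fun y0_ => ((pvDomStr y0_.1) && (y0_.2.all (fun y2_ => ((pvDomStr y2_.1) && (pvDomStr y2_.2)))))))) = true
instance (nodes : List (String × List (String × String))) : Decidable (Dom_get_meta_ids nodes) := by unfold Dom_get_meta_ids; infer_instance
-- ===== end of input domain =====

-- B builds a function_name -> key index dict once and answers with three lookups, instead of
-- A's if/elif capture loop into three variables; return values only (no mutation involved).

-- ===== PORT A =====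
-- A's for-loop over nodes.items() with three accumulator variables; node['function_name'] is a
-- dict lookup (KeyError when absent is excluded by Pre_; the port skips such an element there).
def get_meta_ids (nodes : List (String × List (String × String))) : Option String × Option String × Option String :=
  nodes.foldl
    (fun st kv =>
      match (PySem.Dict.ofList kv.2).get? "function_name" with
      | some fn =>
        if fn = "(program)" then (some kv.1, st.2.1, st.2.2)
        else if fn = "(idle)" then (st.1, some kv.1, st.2.2)
        else if fn = "(garbage collector)" then (st.1, st.2.1, some kv.1)
        else st
      | none => st)
    (none, none, none)

-- ===== PORT B =====
-- the dict comprehension: one insert-building fold, then three .get lookups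
def get_meta_ids_alt (nodes : List (String × List (String × String))) : Option String × Option String × Option String :=
  let index : PySem.Dict String String :=
    nodes.foldl
      (fun d kv =>
        match (PySem.Dict.ofList kv.2).get? "function_name" with
        | some fn => d.insert fn kv.1
        | none => d)
      PySem.Dict.empty
  (index.get? "(program)", index.get? "(idle)", index.get? "(garbage collector)")

-- ===== PRECONDITION & SPEC =====
-- Pre_ excludes exactly the inputs where some node lacks the 'function_name' key, on which A raises KeyError.
def Pre_get_meta_ids (nodes : List (String × List (String × String))) : Prop :=
  ∀ kv ∈ nodes, (kv.2.any (fun p => p.1 == "function_name")) = true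
instance (nodes : List (String × List (String × String))) : Decidable (Pre_get_meta_ids nodes) := by unfold Pre_get_meta_ids; infer_instance

def pvWitness_get_meta_ids : (List (String × List (String × String))) :=
  [("1", [("function_name", "(program)")]), ("2", [("function_name", "foo")])]

def Spec_get_meta_ids (nodes : List (String × List (String × String))) (out : Option String × Option String × Option String) : Prop := out = get_meta_ids_alt nodes
instance (nodes : List (String × List (String × String))) (out : Option String × Option String × Option String) : Decidable (Spec_get_meta_ids nodes out) := by unfold Spec_get_meta_ids; infer_instance

-- ===== CLAIM (what is proved, stated in full; the proofs are below) =====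
def Claim_equal_get_meta_ids : Prop := ∀ (nodes : List (String × List (String × String))), Dom_get_meta_ids nodes → Pre_get_meta_ids nodes → Spec_get_meta_ids nodes (get_meta_ids nodes)

-- ===== LEMMAS AND PROOFS =====

-- loop invariant: A's triple of accumulators is exactly the three lookups in B's partial index
theorem get_meta_ids_inv (nodes : List (String × List (String × String)))
    (d : PySem.Dict String String) :
    nodes.foldl
      (fun st kv =>
        match (PySem.Dict.ofList kv.2).get? "function_name" with
        | some fn =>
          if fn = "(program)" then (some kv.1, st.2.1, st.2.2)
          else if fn = "(idle)" then (st.1, some kv.1, st.2.2)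
          else if fn = "(garbage collector)" then (st.1, st.2.1, some kv.1)
          else st
        | none => st)
      (d.get? "(program)", d.get? "(idle)", d.get? "(garbage collector)")
    =
    (let d' := nodes.foldl
        (fun d kv =>
          match (PySem.Dict.ofList kv.2).get? "function_name" with
          | some fn => d.insert fn kv.1
          | none => d)
        d
     (d'.get? "(program)", d'.get? "(idle)", d'.get? "(garbage collector)")) := by
  induction nodes generalizing d with
  | nil => rfl
  | cons kv rest ih =>
    simp only [List.foldl]
    cases h : (PySem.Dict.ofList kv.2).get? "function_name" with
    | none => simpa using ih d
    | some fn =>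
      by_cases h1 : fn = "(program)"
      · subst h1
        have := ih (d.insert "(program)" kv.1)
        simpa [PySem.Dict.get?_insert_self,
               PySem.Dict.get?_insert_of_ne _ _ (by decide : "(idle)" ≠ "(program)"),
               PySem.Dict.get?_insert_of_ne _ _ (by decide : "(garbage collector)" ≠ "(program)")]
          using this
      · by_cases h2 : fn = "(idle)"
        · subst h2
          have := ih (d.insert "(idle)" kv.1)
          simpa [PySem.Dict.get?_insert_self,
                 PySem.Dict.get?_insert_of_ne _ _ (by decide : "(program)" ≠ "(idle)"),
                 PySem.Dict.get?_insert_of_ne _ _ (by decide : "(garbage collector)" ≠ "(idle)")]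
            using this
        · by_cases h3 : fn = "(garbage collector)"
          · subst h3
            have := ih (d.insert "(garbage collector)" kv.1)
            simpa [PySem.Dict.get?_insert_self,
                   PySem.Dict.get?_insert_of_ne _ _ (by decide : "(program)" ≠ "(garbage collector)"),
                   PySem.Dict.get?_insert_of_ne _ _ (by decide : "(idle)" ≠ "(garbage collector)")]
              using this
          · have := ih (d.insert fn kv.1)
            simpa [h1, h2, h3,
                   PySem.Dict.get?_insert_of_ne _ _ (Ne.symm h1),
                   PySem.Dict.get?_insert_of_ne _ _ (Ne.symm h2),
                   PySem.Dict.get?_insert_of_ne _ _ (Ne.symm h3)]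
              using this

-- ===== VERDICT (by name: the statement is the Claim_ definition above) =====
theorem get_meta_ids_spec : Claim_equal_get_meta_ids := by
  intro nodes _ _
  unfold Spec_get_meta_ids get_meta_ids get_meta_ids_alt
  have h := get_meta_ids_inv nodes PySem.Dict.empty
  simpa using h
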